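-- pv_equiv track=rewrite | github.com/Karan-05/SE_Project | src/experiments/topcoder/dataset_scanner.py | _score_columns
-- ===== SOURCE A (Python) =====
-- from typing import Dict, Iterable, List, Optional, Sequence, Tuple
--
-- IDENTIFIER_HINTS = ["challengeid", "challenge_id", "legacyid", "problem_id", "id", "round_id"]
--
-- TITLE_HINTS = ["title", "name", "challenge", "problem", "task"]
--
-- STATEMENT_HINTS = ["statement", "description", "details", "prompt", "requirements", "overview"]
--
-- SCORING_HINTS = ["tests", "examples", "sample", "constraints", "tags", "technologies"]
--
-- def _normalize_column(name: str) -> str: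
--     return "".join(ch if ch.isalnum() else "_" for ch in name.strip().lower())
--
-- def _score_columns(columns: Iterable[str]) -> Tuple[int, List[str]]:
--     normalized = [_normalize_column(col) for col in columns if col]
--     id_hits = [col for col in normalized if any(hint in col for hint in IDENTIFIER_HINTS)]
--     title_hits = [col for col in normalized if any(hint in col for hint in TITLE_HINTS)]
--     statement_hits = [col for col in normalized if any(hint in col for hint in STATEMENT_HINTS)]
--     bonus_hits = [col for col in normalized if any(hint in col for hint in SCORING_HINTS)]
--     score = 0
--     if id_hits:
--         score += 2
--     if title_hits:
--         score += 1
--     if statement_hits: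
--         score += 2
--     if bonus_hits:
--         score += 1
--     interesting_cols = sorted(set(id_hits + title_hits + statement_hits + bonus_hits))
--     return score, interesting_cols
-- ===== SOURCE B (Python) =====
-- IDENTIFIER_HINTS = ["challengeid", "challenge_id", "legacyid", "problem_id", "id", "round_id"]
-- TITLE_HINTS = ["title", "name", "challenge", "problem", "task"]
-- STATEMENT_HINTS = ["statement", "description", "details", "prompt", "requirements", "overview"]
-- SCORING_HINTS = ["tests", "examples", "sample", "constraints", "tags", "technologies"]
--
--
-- def _score_columns(columns):
--     id_seen = title_seen = statement_seen = bonus_seen = False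
--     interesting = set()
--     for col in columns:
--         if not col:
--             continue
--         norm = "".join(ch if ch.isalnum() else "_" for ch in col.strip().lower())
--         hit_id = any(h in norm for h in IDENTIFIER_HINTS)
--         hit_title = any(h in norm for h in TITLE_HINTS)
--         hit_statement = any(h in norm for h in STATEMENT_HINTS)
--         hit_bonus = any(h in norm for h in SCORING_HINTS)
--         id_seen = id_seen or hit_id
--         title_seen = title_seen or hit_title
--         statement_seen = statement_seen or hit_statement
--         bonus_seen = bonus_seen or hit_bonus
--         if hit_id or hit_title or hit_statement or hit_bonus:
--             interesting.add(norm)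
--     score = (2 if id_seen else 0) + (1 if title_seen else 0) \
--         + (2 if statement_seen else 0) + (1 if bonus_seen else 0)
--     return score, sorted(interesting)
-- ===== Notes on version B (the rewrite author's own statement) =====
-- stated objective: alternative
-- what changed: B makes a single pass over the columns maintaining four booleans and a deduplicating set, instead of A's four separate filter scans over the normalized list plus a concatenation; the score is computed from the booleans and the set is sorted at the end.
import Mathlib
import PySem

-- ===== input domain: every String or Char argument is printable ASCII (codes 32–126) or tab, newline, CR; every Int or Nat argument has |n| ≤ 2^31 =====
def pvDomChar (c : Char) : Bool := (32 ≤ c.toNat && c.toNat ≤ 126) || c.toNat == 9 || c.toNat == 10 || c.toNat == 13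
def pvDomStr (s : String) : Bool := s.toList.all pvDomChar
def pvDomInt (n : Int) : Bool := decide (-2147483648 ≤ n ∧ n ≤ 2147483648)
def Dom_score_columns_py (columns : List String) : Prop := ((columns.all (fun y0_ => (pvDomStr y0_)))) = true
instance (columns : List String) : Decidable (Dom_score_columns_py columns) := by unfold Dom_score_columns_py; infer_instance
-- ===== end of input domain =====

-- B replaces A's four separate comprehension scans over the normalized columns by one
-- single pass maintaining four booleans and a set of interesting columns (objective: alternative).

-- ===== PORT A =====
def pvIdHints : List String := ["challengeid", "challenge_id", "legacyid", "problem_id", "id", "round_id"]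
def pvTitleHints : List String := ["title", "name", "challenge", "problem", "task"]
def pvStatementHints : List String := ["statement", "description", "details", "prompt", "requirements", "overview"]
def pvScoringHints : List String := ["tests", "examples", "sample", "constraints", "tags", "technologies"]

-- ''.join(ch if ch.isalnum() else '_' for ch in name.strip().lower()): joining one-character
-- pieces is exactly String.ofList of the per-character map (exact on the stated ASCII domain).
def pvNormalize (name : String) : String :=
  String.ofList ((PySem.Chars.lower (PySem.Chars.strip name.toList)).map
    (fun ch => if PySem.Chars.isalnum ch then ch else '_'))

def pvHit (hints : List String) (col : String) : Bool :=
  hints.any (fun hint => PySem.Str.isIn hint col)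

def score_columns_py (columns : List String) : Int × List String :=
  let normalized := (columns.filter (fun col => col != "")).map pvNormalize
  let id_hits := normalized.filter (pvHit pvIdHints)
  let title_hits := normalized.filter (pvHit pvTitleHints)
  let statement_hits := normalized.filter (pvHit pvStatementHints)
  let bonus_hits := normalized.filter (pvHit pvScoringHints)
  let score : Int :=
    (((0 + (if id_hits ≠ [] then 2 else 0)) + (if title_hits ≠ [] then 1 else 0))
       + (if statement_hits ≠ [] then 2 else 0)) + (if bonus_hits ≠ [] then 1 else 0)
  let interesting_cols :=
    PySem.List.sorted (PySem.Set.ofList (id_hits ++ title_hits ++ statement_hits ++ bonus_hits))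
      (fun x => x) false
  (score, interesting_cols)

-- ===== PORT B =====
def pvStepB (st : Bool × Bool × Bool × Bool × PySem.Set String) (col : String) :
    Bool × Bool × Bool × Bool × PySem.Set String :=
  if col == "" then st else
    let norm := pvNormalize col
    let hi := pvHit pvIdHints norm
    let ht := pvHit pvTitleHints norm
    let hs := pvHit pvStatementHints norm
    let hb := pvHit pvScoringHints norm
    (st.1 || hi, st.2.1 || ht, st.2.2.1 || hs, st.2.2.2.1 || hb,
     if hi || ht || hs || hb then PySem.Set.add st.2.2.2.2 norm else st.2.2.2.2)

def score_columns_py_alt (columns : List String) : Int × List String :=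
  let st := columns.foldl pvStepB (false, false, false, false, PySem.Set.empty)
  ((if st.1 then 2 else 0) + (if st.2.1 then 1 else 0)
     + (if st.2.2.1 then 2 else 0) + (if st.2.2.2.1 then 1 else 0),
   PySem.List.sorted st.2.2.2.2 (fun x => x) false)

-- ===== PRECONDITION & SPEC =====
def Spec_score_columns_py (columns : List String) (out : Int × List String) : Prop := out = score_columns_py_alt columns
instance (columns : List String) (out : Int × List String) : Decidable (Spec_score_columns_py columns out) := by unfold Spec_score_columns_py; infer_instance

-- ===== CLAIM (what is proved, stated in full; the proofs are below) =====
def Claim_equal_score_columns_py : Prop := ∀ (columns : List String), Dom_score_columns_py columns → Spec_score_columns_py columns (score_columns_py columns)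

-- ===== LEMMAS AND PROOFS =====

def pvAnyHit (col : String) : Bool :=
  pvHit pvIdHints col || pvHit pvTitleHints col || pvHit pvStatementHints col || pvHit pvScoringHints col

-- invariant of B's single pass
theorem pvFoldB_eq (columns : List String) (i t s b : Bool) (acc : PySem.Set String) :
    columns.foldl pvStepB (i, t, s, b, acc) =
      (i || ((columns.filter (fun col => col != "")).map pvNormalize).any (pvHit pvIdHints),
       t || ((columns.filter (fun col => col != "")).map pvNormalize).any (pvHit pvTitleHints),
       s || ((columns.filter (fun col => col != "")).map pvNormalize).any (pvHit pvStatementHints),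
       b || ((columns.filter (fun col => col != "")).map pvNormalize).any (pvHit pvScoringHints),
       PySem.Set.update acc (((columns.filter (fun col => col != "")).map pvNormalize).filter pvAnyHit)) := by
  induction columns generalizing i t s b acc with
  | nil => simp [PySem.Set.update]
  | cons c cs ih =>
    by_cases hc : c = ""
    · simp [hc, pvStepB, ih]
    · have hc' : (c != "") = true := by simp [hc]
      simp only [List.foldl_cons, List.filter_cons, hc', if_pos, pvStepB, List.map_cons, List.any_cons, List.filter_cons]
      rw [if_neg (by simp [hc]), ih]
      by_cases hhit : pvAnyHit (pvNormalize c) = true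
      · have : (pvHit pvIdHints (pvNormalize c) || pvHit pvTitleHints (pvNormalize c)
           || pvHit pvStatementHints (pvNormalize c) || pvHit pvScoringHints (pvNormalize c)) = true := by
          simpa [pvAnyHit, Bool.or_assoc] using hhit
        simp [hhit, PySem.Set.update, Bool.or_assoc]
        rw [if_pos (by simp_all [pvAnyHit, Bool.or_assoc])]
      · have : (pvHit pvIdHints (pvNormalize c) || pvHit pvTitleHints (pvNormalize c)
           || pvHit pvStatementHints (pvNormalize c) || pvHit pvScoringHints (pvNormalize c)) = false := by
          simpa [pvAnyHit, Bool.or_assoc] using hhit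
        simp [hhit, PySem.Set.update, Bool.or_assoc]
        rw [if_neg (by simp_all [pvAnyHit, Bool.or_assoc])]

theorem pvSets_perm (nm : List String) :
    (PySem.Set.ofList (nm.filter pvAnyHit) : List String).Perm
      (PySem.Set.ofList (nm.filter (pvHit pvIdHints) ++ nm.filter (pvHit pvTitleHints)
        ++ nm.filter (pvHit pvStatementHints) ++ nm.filter (pvHit pvScoringHints))) := by
  rw [List.perm_ext_iff_of_nodup (PySem.Set.nodup_ofList _) (PySem.Set.nodup_ofList _)]
  intro x
  simp only [PySem.Set.mem_ofList, List.mem_append, List.mem_filter, pvAnyHit, Bool.or_eq_true]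
  tauto

-- ===== VERDICT (by name: the statement is the Claim_ definition above) =====
theorem score_columns_py_spec : Claim_equal_score_columns_py := by
  intro columns _
  unfold Spec_score_columns_py score_columns_py score_columns_py_alt
  rw [pvFoldB_eq]
  simp only [Bool.false_or]
  set nm := (columns.filter (fun col => col != "")).map pvNormalize with hnm
  refine Prod.ext_iff.mpr ⟨?_, ?_⟩
  · have h1 : (nm.filter (pvHit pvIdHints) ≠ []) ↔ nm.any (pvHit pvIdHints) = true := by
      simp [List.filter_eq_nil_iff, List.any_eq_true]
    have h2 : (nm.filter (pvHit pvTitleHints) ≠ []) ↔ nm.any (pvHit pvTitleHints) = true := by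
      simp [List.filter_eq_nil_iff, List.any_eq_true]
    have h3 : (nm.filter (pvHit pvStatementHints) ≠ []) ↔ nm.any (pvHit pvStatementHints) = true := by
      simp [List.filter_eq_nil_iff, List.any_eq_true]
    have h4 : (nm.filter (pvHit pvScoringHints) ≠ []) ↔ nm.any (pvHit pvScoringHints) = true := by
      simp [List.filter_eq_nil_iff, List.any_eq_true]
    by_cases c1 : nm.any (pvHit pvIdHints) = true <;>
    by_cases c2 : nm.any (pvHit pvTitleHints) = true <;>
    by_cases c3 : nm.any (pvHit pvStatementHints) = true <;>
    by_cases c4 : nm.any (pvHit pvScoringHints) = true <;>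
      simp [h1.mpr, h2.mpr, h3.mpr, h4.mpr, c1, c2, c3, c4,
        (not_iff_not.mpr h1).mpr, (not_iff_not.mpr h2).mpr, (not_iff_not.mpr h3).mpr,
        (not_iff_not.mpr h4).mpr]
  · have hupd : PySem.Set.update (PySem.Set.empty : PySem.Set String) (nm.filter pvAnyHit)
        = PySem.Set.ofList (nm.filter pvAnyHit) := by
      simp [PySem.Set.update, PySem.Set.empty, PySem.Set.ofList_eq_foldl]
    rw [hupd]
    exact (PySem.List.sorted_eq_sorted_of_perm _ _ _ (fun a b h => h) (pvSets_perm nm)).symm
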